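-- pv_equiv track=rewrite | github.com/nelsonlai/freelance | leetcode/leetcode_problems/codes/1989_maximum-number-of-people-that-can-be-caught-in-tag/python3.py | catchMaximumAmountofPeople
-- ===== SOURCE A (Python) =====
-- from typing import List
--
-- def catchMaximumAmountofPeople(team: List[int], dist: int) -> int:
--     taggers = [i for i, t in enumerate(team) if t == 1]
--     runners = [i for i, t in enumerate(team) if t == 0]
--
--     if not taggers or not runners:
--         return 0
--
--     count = 0
--     t_idx = r_idx = 0
--
--     while t_idx < len(taggers) and r_idx < len(runners):
--         if abs(taggers[t_idx] - runners[r_idx]) <= dist: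
--             count += 1
--             t_idx += 1
--             r_idx += 1
--         elif taggers[t_idx] < runners[r_idx]:
--             t_idx += 1
--         else:
--             r_idx += 1
--
--     return count
-- ===== SOURCE B (Python) =====
-- from typing import List
--
-- def catchMaximumAmountofPeople(team: List[int], dist: int) -> int:
--     count = 0
--     pend_t = []  # FIFO of pending (unmatched) tagger positions
--     pend_r = []  # FIFO of pending (unmatched) runner positions
--     for i, t in enumerate(team):
--         if t == 1:
--             while pend_r and i - pend_r[0] > dist:
--                 pend_r.pop(0)
--             if pend_r:
--                 pend_r.pop(0)
--                 count += 1
--             else: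
--                 pend_t.append(i)
--         elif t == 0:
--             while pend_t and i - pend_t[0] > dist:
--                 pend_t.pop(0)
--             if pend_t:
--                 pend_t.pop(0)
--                 count += 1
--             else:
--                 pend_r.append(i)
--     return count
-- ===== Notes on version B (the rewrite author's own statement) =====
-- stated objective: alternative
-- what changed: Replaced A's preprocessing into two full index lists plus a two-pointer merge by a single pass over team that maintains two FIFO queues of pending unmatched tagger/runner positions, pruning out-of-range fronts and matching greedily.
import Mathlib
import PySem

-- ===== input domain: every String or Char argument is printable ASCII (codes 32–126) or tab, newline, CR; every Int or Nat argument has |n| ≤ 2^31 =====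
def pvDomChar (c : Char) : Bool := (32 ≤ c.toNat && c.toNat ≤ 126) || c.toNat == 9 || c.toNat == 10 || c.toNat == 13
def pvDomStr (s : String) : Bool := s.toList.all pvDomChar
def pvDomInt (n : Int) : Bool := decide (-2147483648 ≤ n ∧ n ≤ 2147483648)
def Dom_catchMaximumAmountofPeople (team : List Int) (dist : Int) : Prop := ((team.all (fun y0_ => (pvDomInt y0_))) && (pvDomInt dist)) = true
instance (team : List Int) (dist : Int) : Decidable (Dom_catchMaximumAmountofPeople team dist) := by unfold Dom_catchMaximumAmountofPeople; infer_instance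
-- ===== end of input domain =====

-- B replaces A's build-two-index-lists + two-pointer merge by a single pass over `team`
-- maintaining two FIFO queues of pending tagger/runner positions (objective: alternative).


-- ===== PORT A =====
-- the while loop of A: two pointers into taggers/runners, modelled by consuming heads
def pvALoop (dist : Int) : List Int → List Int → Int → Int
  | t :: ts, r :: rs, count =>
    if |t - r| ≤ dist then pvALoop dist ts rs (count + 1)
    else if t < r then pvALoop dist ts (r :: rs) count
    else pvALoop dist (t :: ts) rs count
  | _, _, count => count
  termination_by ts rs _ => ts.length + rs.length

def catchMaximumAmountofPeople (team : List Int) (dist : Int) : Int :=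
  let taggers := ((PySem.List.enumerate team).filter (fun p => p.2 == 1)).map Prod.fst
  let runners := ((PySem.List.enumerate team).filter (fun p => p.2 == 0)).map Prod.fst
  if taggers = [] ∨ runners = [] then 0
  else pvALoop dist taggers runners 0

-- ===== PORT B =====
-- `while pend and i - pend[0] > dist: pend.pop(0)`
def pvPrune (dist i : Int) : List Int → List Int
  | [] => []
  | r :: rs => if i - r > dist then pvPrune dist i rs else r :: rs

-- the for loop of B over enumerate(team), state = (pend_t, pend_r, count)
def pvBLoop (dist : Int) : List (Int × Int) → List Int → List Int → Int → Int
  | [], _, _, count => count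
  | (i, t) :: rest, pt, pr, count =>
    if t = 1 then
      match pvPrune dist i pr with
      | _ :: pr' => pvBLoop dist rest pt pr' (count + 1)
      | [] => pvBLoop dist rest (pt ++ [i]) [] count
    else if t = 0 then
      match pvPrune dist i pt with
      | _ :: pt' => pvBLoop dist rest pt' pr (count + 1)
      | [] => pvBLoop dist rest [] (pr ++ [i]) count
    else pvBLoop dist rest pt pr count

def catchMaximumAmountofPeople_alt (team : List Int) (dist : Int) : Int :=
  pvBLoop dist (PySem.List.enumerate team) [] [] 0

-- ===== PRECONDITION & SPEC =====
def Spec_catchMaximumAmountofPeople (team : List Int) (dist : Int) (out : Int) : Prop := out = catchMaximumAmountofPeople_alt team dist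
instance (team : List Int) (dist : Int) (out : Int) : Decidable (Spec_catchMaximumAmountofPeople team dist out) := by unfold Spec_catchMaximumAmountofPeople; infer_instance

-- ===== CLAIM (what is proved, stated in full; the proofs are below) =====
def Claim_equal_catchMaximumAmountofPeople : Prop := ∀ (team : List Int) (dist : Int), Dom_catchMaximumAmountofPeople team dist → Spec_catchMaximumAmountofPeople team dist (catchMaximumAmountofPeople team dist)

-- ===== LEMMAS AND PROOFS =====

-- taggers / runners contributed by a remaining enumerated suffix
def pvTg (rest : List (Int × Int)) : List Int := (rest.filter (fun p => p.2 == 1)).map Prod.fst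
def pvRn (rest : List (Int × Int)) : List Int := (rest.filter (fun p => p.2 == 0)).map Prod.fst

theorem pvPrune_mem {dist i x : Int} {l : List Int} (h : x ∈ pvPrune dist i l) : x ∈ l := by
  induction l with
  | nil => simp [pvPrune] at h
  | cons r rs ih =>
    simp only [pvPrune] at h
    split at h
    · exact List.mem_cons_of_mem _ (ih h)
    · exact h

theorem pvPrune_head {dist i r : Int} {l l' : List Int} (h : pvPrune dist i l = r :: l') :
    i - r ≤ dist := by
  induction l with
  | nil => simp [pvPrune] at h
  | cons a as ih =>
    simp only [pvPrune] at h
    split at h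
    · exact ih h
    · cases h; omega

theorem pvALoop_nil_right (dist : Int) (ts : List Int) (c : Int) : pvALoop dist ts [] c = c := by
  cases ts <;> simp [pvALoop]

theorem pvALoop_nil_left (dist : Int) (rs : List Int) (c : Int) : pvALoop dist [] rs c = c := by
  cases rs <;> simp [pvALoop]

-- skipping stale runners at the front agrees with A's "advance r" branch
theorem pvALoop_prune_runner (dist i : Int) (ts : List Int) (pr tail : List Int) (c : Int)
    (hlt : ∀ r ∈ pr, r < i) :
    pvALoop dist (i :: ts) (pr ++ tail) c = pvALoop dist (i :: ts) (pvPrune dist i pr ++ tail) c := by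
  induction pr with
  | nil => simp [pvPrune]
  | cons r rs ih =>
    have hr : r < i := hlt r (by simp)
    by_cases hst : i - r > dist
    · have h1 : ¬ |i - r| ≤ dist := by rw [abs_of_pos (by omega : (0:Int) < i - r)]; omega
      have h2 : ¬ i < r := by omega
      rw [List.cons_append, pvALoop, if_neg h1, if_neg h2]
      rw [ih (fun x hx => hlt x (List.mem_cons_of_mem _ hx))]
      simp [pvPrune, hst]
    · simp [pvPrune, hst]

-- skipping stale taggers at the front agrees with A's "advance t" branch
theorem pvALoop_prune_tagger (dist i : Int) (rs : List Int) (pt tail : List Int) (c : Int)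
    (hlt : ∀ t ∈ pt, t < i) :
    pvALoop dist (pt ++ tail) (i :: rs) c = pvALoop dist (pvPrune dist i pt ++ tail) (i :: rs) c := by
  induction pt with
  | nil => simp [pvPrune]
  | cons t ts ih =>
    have ht : t < i := hlt t (by simp)
    by_cases hst : i - t > dist
    · have h1 : ¬ |t - i| ≤ dist := by rw [abs_of_neg (by omega : t - i < 0)]; omega
      have h2 : t < i := ht
      rw [List.cons_append, pvALoop, if_neg h1, if_pos h2]
      rw [ih (fun x hx => hlt x (List.mem_cons_of_mem _ hx))]
      simp [pvPrune, hst]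
    · simp [pvPrune, hst]

-- main invariant: B's one-pass loop computes what A's two-pointer loop computes
theorem pvLoop_bridge (dist : Int) :
    ∀ (rest : List (Int × Int)) (pt pr : List Int) (c : Int),
      (pt = [] ∨ pr = []) →
      (∀ x ∈ pt, ∀ p ∈ rest, x < p.1) →
      (∀ x ∈ pr, ∀ p ∈ rest, x < p.1) →
      rest.Pairwise (fun a b => a.1 < b.1) →
      pvBLoop dist rest pt pr c = pvALoop dist (pt ++ pvTg rest) (pr ++ pvRn rest) c := by
  intro rest
  induction rest with
  | nil =>
    intro pt pr c hor _ _ _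
    rcases hor with h | h <;> subst h
    · simp [pvBLoop, pvTg, pvRn, pvALoop_nil_left]
    · simp [pvBLoop, pvTg, pvRn, pvALoop_nil_right]
  | cons p rest ih =>
    obtain ⟨i, t⟩ := p
    intro pt pr c hor hpt hpr hpw
    have hpt' : ∀ x ∈ pt, ∀ q ∈ rest, x < q.1 :=
      fun x hx q hq => hpt x hx q (List.mem_cons_of_mem _ hq)
    have hpr' : ∀ x ∈ pr, ∀ q ∈ rest, x < q.1 :=
      fun x hx q hq => hpr x hx q (List.mem_cons_of_mem _ hq)
    have hi : ∀ q ∈ rest, i < q.1 := fun q hq => (List.pairwise_cons.mp hpw).1 q hq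
    have hpw' : rest.Pairwise (fun a b => a.1 < b.1) := (List.pairwise_cons.mp hpw).2
    by_cases ht1 : t = 1
    · subst ht1
      have htg : pvTg ((i, 1) :: rest) = i :: pvTg rest := by simp [pvTg]
      have hrn : pvRn ((i, 1) :: rest) = pvRn rest := by simp [pvRn]
      rw [htg, hrn]
      have hprlt : ∀ r ∈ pr, r < i := fun r hr => hpr r hr (i, 1) (by simp)
      rcases hor with hptnil | hprnil
      · -- pt = []: A's loop sees i as the current tagger head
        subst hptnil
        rw [List.nil_append, pvALoop_prune_runner dist i (pvTg rest) pr (pvRn rest) c hprlt]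
        rcases hpp : pvPrune dist i pr with _ | ⟨r0, pr'⟩
        · -- all pending runners stale: i becomes pending
          rw [pvBLoop]
          simp only [hpp]
          rw [ih (([] : List Int) ++ [i]) [] c (Or.inr rfl)
              (by intro x hx q hq; simp at hx; subst hx; exact hi q hq)
              (by intro x hx; simp at hx) hpw']
          simp
        · -- match with the oldest in-range pending runner
          have hr0mem : r0 ∈ pr := pvPrune_mem (by rw [hpp]; simp)
          have hr0 : r0 < i := hprlt r0 hr0mem
          have hd : i - r0 ≤ dist := pvPrune_head hpp
          have habs : |i - r0| ≤ dist := by rw [abs_of_pos (by omega : (0:Int) < i - r0)]; omega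
          rw [pvBLoop]
          simp only [hpp]
          rw [List.cons_append, pvALoop, if_pos habs]
          exact ih [] pr' (c + 1) (Or.inl rfl) (by intro x hx; simp at hx)
            (fun x hx => hpr' x (pvPrune_mem (by rw [hpp]; exact List.mem_cons_of_mem _ hx))) hpw'
      · -- pr = []
        subst hprnil
        rw [pvBLoop]
        simp only [pvPrune]
        rw [ih (pt ++ [i]) [] c (Or.inr rfl)
            (by intro x hx q hq; rcases List.mem_append.mp hx with h | h
                · exact hpt' x h q hq
                · simp at h; subst h; exact hi q hq)
            (by intro x hx; simp at hx) hpw']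
        simp
    · by_cases ht0 : t = 0
      · subst ht0
        have htg : pvTg ((i, 0) :: rest) = pvTg rest := by simp [pvTg]
        have hrn : pvRn ((i, 0) :: rest) = i :: pvRn rest := by simp [pvRn]
        rw [htg, hrn]
        have hptlt : ∀ x ∈ pt, x < i := fun x hx => hpt x hx (i, 0) (by simp)
        rcases hor with hptnil | hprnil
        · -- pt = []
          subst hptnil
          rw [pvBLoop]
          simp only [if_neg (by decide : ¬ (0:Int) = 1), pvPrune]
          rw [ih [] (pr ++ [i]) c (Or.inl rfl) (by intro x hx; simp at hx)
              (by intro x hx q hq; rcases List.mem_append.mp hx with h | h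
                  · exact hpr' x h q hq
                  · simp at h; subst h; exact hi q hq) hpw']
          simp
        · subst hprnil
          rw [List.nil_append, pvALoop_prune_tagger dist i (pvRn rest) pt (pvTg rest) c hptlt]
          rcases hpp : pvPrune dist i pt with _ | ⟨t0, pt'⟩
          · rw [pvBLoop]
            simp only [if_neg (by decide : ¬ (0:Int) = 1), hpp]
            rw [ih [] (([] : List Int) ++ [i]) c (Or.inl rfl) (by intro x hx; simp at hx)
                (by intro x hx q hq; simp at hx; subst hx; exact hi q hq) hpw']
            simp
          · have ht0mem : t0 ∈ pt := pvPrune_mem (by rw [hpp]; simp)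
            have ht0lt : t0 < i := hptlt t0 ht0mem
            have hd : i - t0 ≤ dist := pvPrune_head hpp
            have habs : |t0 - i| ≤ dist := by rw [abs_of_neg (by omega : t0 - i < 0)]; omega
            rw [pvBLoop]
            simp only [if_neg (by decide : ¬ (0:Int) = 1), hpp]
            rw [List.cons_append, pvALoop, if_pos habs]
            exact ih pt' [] (c + 1) (Or.inr rfl)
              (fun x hx => hpt' x (pvPrune_mem (by rw [hpp]; exact List.mem_cons_of_mem _ hx)))
              (by intro x hx; simp at hx) hpw'
      · -- other team values: both sides ignore index i
        have htg : pvTg ((i, t) :: rest) = pvTg rest := by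
          simp [pvTg, ht1]
        have hrn : pvRn ((i, t) :: rest) = pvRn rest := by
          simp [pvRn, ht0]
        rw [htg, hrn, pvBLoop]
        simp only [if_neg ht1, if_neg ht0]
        exact ih pt pr c hor hpt' hpr' hpw'

-- ===== VERDICT (by name: the statement is the Claim_ definition above) =====
theorem catchMaximumAmountofPeople_spec : Claim_equal_catchMaximumAmountofPeople := by
  intro team dist _
  unfold Spec_catchMaximumAmountofPeople catchMaximumAmountofPeople catchMaximumAmountofPeople_alt
  show (if (pvTg (PySem.List.enumerate team) = [] ∨ pvRn (PySem.List.enumerate team) = [])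
        then 0 else pvALoop dist (pvTg (PySem.List.enumerate team)) (pvRn (PySem.List.enumerate team)) 0)
      = pvBLoop dist (PySem.List.enumerate team) [] [] 0
  rw [pvLoop_bridge dist (PySem.List.enumerate team) [] [] 0 (Or.inl rfl)
    (by intro x hx; simp at hx) (by intro x hx; simp at hx)
    (PySem.List.pairwise_lt_enumerate team 0), List.nil_append, List.nil_append]
  split
  · rename_i h
    rcases h with h | h
    · rw [h, pvALoop_nil_left]
    · rw [h, pvALoop_nil_right]
  · rfl
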